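-- pv_equiv track=rewrite | github.com/obre10off/pinterest-scraper | tiktok-scraper/data_extractor.py | extract_hook
-- ===== SOURCE A (Python) =====
-- def extract_hook(caption: str, max_length: int = 50) -> str:
--     """Extract the hook (first compelling part) of the caption"""
--     if not caption:
--         return ""
--
--     # Clean caption
--     clean_caption = caption.strip()
--
--     # Find natural break points
--     break_points = [
--         clean_caption.find('\n'),
--         clean_caption.find('!'),
--         clean_caption.find('?'),
--         clean_caption.find('...'),
--         clean_caption.find('#')
--     ]
--
--     # Filter valid break points
--     valid_breaks = [bp for bp in break_points if 0 < bp < max_length]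
--
--     if valid_breaks:
--         # Use the earliest break point
--         hook_end = min(valid_breaks) + 1
--         return clean_caption[:hook_end].strip()
--
--     # No natural break, use max_length
--     if len(clean_caption) <= max_length:
--         return clean_caption
--
--     # Find word boundary near max_length
--     space_before = clean_caption.rfind(' ', 0, max_length)
--     if space_before > 0:
--         return clean_caption[:space_before].strip() + "..."
--
--     return clean_caption[:max_length].strip() + "..."
-- ===== SOURCE B (Python) =====
-- def extract_hook(caption: str, max_length: int = 50) -> str:
--     """Extract the hook (first compelling part) of the caption"""
--     if not caption:
--         return ""
--
--     c = caption.strip()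
--
--     # One pass over the scanned prefix, recording where each break token
--     # first appears; a break at position 0 would give an empty hook.
--     first = {}
--     i = 0
--     while i < len(c) and i < max_length:
--         ch = c[i]
--         if ch in '\n!?#' and ch not in first:
--             first[ch] = i
--         if '...' not in first and c[i:i+3] == '...':
--             first['...'] = i
--         i += 1
--     valid = [p for p in first.values() if p > 0]
--
--     if valid:
--         return c[:min(valid) + 1].strip()
--
--     if len(c) <= max_length:
--         return c
--
--     space_before = c.rfind(' ', 0, max_length)
--     if space_before > 0:
--         return c[:space_before].strip() + "..."
--     return c[:max_length].strip() + "..."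
-- ===== Notes on version B (the rewrite author's own statement) =====
-- stated objective: alternative
-- what changed: B replaces A's five separate find() scans and the break_points list by one bounded left-to-right pass that records each break token's first occurrence in a dict, then filters and takes the minimum; the length-based fallback is unchanged.
import Mathlib
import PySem

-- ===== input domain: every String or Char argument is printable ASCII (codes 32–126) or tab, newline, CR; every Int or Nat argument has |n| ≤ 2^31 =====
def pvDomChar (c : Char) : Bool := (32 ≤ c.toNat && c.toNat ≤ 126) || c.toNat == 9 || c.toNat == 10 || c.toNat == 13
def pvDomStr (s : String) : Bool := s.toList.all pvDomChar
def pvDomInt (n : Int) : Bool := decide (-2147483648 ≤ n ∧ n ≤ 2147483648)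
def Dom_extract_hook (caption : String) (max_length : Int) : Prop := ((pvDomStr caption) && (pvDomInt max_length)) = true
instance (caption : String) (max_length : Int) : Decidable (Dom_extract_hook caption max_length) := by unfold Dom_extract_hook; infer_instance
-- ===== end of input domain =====

-- B replaces A's five find() passes + filtered min() by one bounded pass recording each break
-- token's first occurrence in a dict; same return value on every input, no speed claim.

-- ===== PORT A =====
def extract_hook (caption : String) (max_length : Int) : String :=
  if caption = "" then ""
  else
    let clean := PySem.Chars.strip caption.toList
    let break_points : List Int :=
      [PySem.Chars.find clean ['\n'], PySem.Chars.find clean ['!'],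
       PySem.Chars.find clean ['?'], PySem.Chars.find clean ['.', '.', '.'],
       PySem.Chars.find clean ['#']]
    let valid_breaks := break_points.filter (fun bp => decide (0 < bp) && decide (bp < max_length))
    match PySem.List.min? valid_breaks (fun x => x) with
    | some m =>
        String.ofList (PySem.Chars.strip (PySem.Chars.slice clean none (some (m + 1))))
    | none =>
        if PySem.Chars.len clean ≤ max_length then String.ofList clean
        else
          let space_before := PySem.Chars.rfindFrom clean [' '] 0 (some max_length)
          if 0 < space_before then
            String.ofList (PySem.Chars.strip (PySem.Chars.slice clean none (some space_before)) ++ ['.', '.', '.'])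
          else
            String.ofList (PySem.Chars.strip (PySem.Chars.slice clean none (some max_length)) ++ ['.', '.', '.'])

-- ===== PORT B =====
-- the while-loop of Source B (fuel = the list length, so the guard i < len(c) is reached first):
-- record each break token's first occurrence, bounded by max_length
def pvLoop (cs : List Char) (maxl : Int) : PySem.Dict String Int → Nat → Nat → PySem.Dict String Int
  | d, _, 0 => d
  | d, i, fuel + 1 =>
    if h : i < cs.length then
      if (i : Int) < maxl then
        let ch := cs[i]
        let d1 := if (['\n', '!', '?', '#'].contains ch) && !(d.contains (String.ofList [ch])) then
            d.insert (String.ofList [ch]) (i : Int) else d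
        let d2 := if !(d1.contains "...") && ((cs.drop i).take 3 == ['.', '.', '.']) then
            d1.insert "..." (i : Int) else d1
        pvLoop cs maxl d2 (i + 1) fuel
      else d
    else d

def extract_hook_alt (caption : String) (max_length : Int) : String :=
  if caption = "" then ""
  else
    let c := PySem.Chars.strip caption.toList
    let first := pvLoop c max_length PySem.Dict.empty 0 c.length
    let valid := first.values.filter (fun p => decide (0 < p))
    match PySem.List.min? valid (fun x => x) with
    | some m =>
        String.ofList (PySem.Chars.strip (PySem.Chars.slice c none (some (m + 1))))
    | none =>
        if PySem.Chars.len c ≤ max_length then String.ofList c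
        else
          let space_before := PySem.Chars.rfindFrom c [' '] 0 (some max_length)
          if 0 < space_before then
            String.ofList (PySem.Chars.strip (PySem.Chars.slice c none (some space_before)) ++ ['.', '.', '.'])
          else
            String.ofList (PySem.Chars.strip (PySem.Chars.slice c none (some max_length)) ++ ['.', '.', '.'])

-- ===== PRECONDITION & SPEC =====
def Spec_extract_hook (caption : String) (max_length : Int) (out : String) : Prop :=
  out = extract_hook_alt caption max_length
instance (caption : String) (max_length : Int) (out : String) : Decidable (Spec_extract_hook caption max_length out) := by
  unfold Spec_extract_hook; infer_instance

-- ===== CLAIM (what is proved, stated in full; the proofs are below) =====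
def Claim_equal_extract_hook : Prop := ∀ (caption : String) (max_length : Int), Dom_extract_hook caption max_length → Spec_extract_hook caption max_length (extract_hook caption max_length)

-- ===== LEMMAS AND PROOFS =====

def pvToksL : List String := ["\n", "!", "?", "#", "..."]

-- token k matches at position j (the loop's per-position test, read off the list)
def pvTokAt (cs : List Char) (k : String) (j : Nat) : Bool :=
  if k = "..." then ((cs.drop j).take 3 == ['.', '.', '.'])
  else (['\n', '!', '?', '#'].contains (cs.getD j ' ')) && (k == String.ofList [cs.getD j ' '])

-- per-key specification of the loop: the first in-bound position where k matches
def pvFirst (cs : List Char) (maxl : Int) (k : String) : Nat → Nat → Option Int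
  | _, 0 => none
  | i, fuel + 1 =>
    if i < cs.length then
      if (i : Int) < maxl then
        if pvTokAt cs k i then some (i : Int) else pvFirst cs maxl k (i + 1) fuel
      else none
    else none

def pvBps (cs : List Char) : List Int :=
  [PySem.Chars.find cs ['\n'], PySem.Chars.find cs ['!'],
   PySem.Chars.find cs ['?'], PySem.Chars.find cs ['.', '.', '.'],
   PySem.Chars.find cs ['#']]

lemma singleton_prefix_at (cs : List Char) (c : Char) (j : Nat) :
    [c] <+: cs.drop j ↔ ∃ h : j < cs.length, cs[j] = c := by
  constructor
  · rintro ⟨t, ht⟩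
    have hh : (cs.drop j).head? = some c := by rw [← ht]; rfl
    rw [List.head?_drop] at hh
    exact List.getElem?_eq_some_iff.mp hh
  · rintro ⟨hlt, rfl⟩
    have hh : (cs.drop j).head? = some cs[j] := by
      rw [List.head?_drop]
      exact List.getElem?_eq_some_iff.mpr ⟨hlt, rfl⟩
    cases hd : cs.drop j with
    | nil => rw [hd] at hh; simp at hh
    | cons a t =>
      rw [hd] at hh
      simp only [List.head?_cons, Option.some.injEq] at hh
      exact ⟨t, by simp [hh]⟩

lemma dots_prefix_at (cs : List Char) (j : Nat) :
    (['.', '.', '.'] : List Char) <+: cs.drop j ↔ (((cs.drop j).take 3 == ['.', '.', '.']) : Bool) = true := by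
  rw [List.prefix_iff_eq_take, beq_iff_eq, show (['.', '.', '.'] : List Char).length = 3 from rfl, eq_comm]

lemma find_le_of_prefix (cs t : List Char) (j : Nat) (h : t <+: cs.drop j) :
    0 ≤ PySem.Chars.find cs t ∧ (PySem.Chars.find cs t).toNat ≤ j ∧
      PySem.Chars.find cs t ≤ (j : Int) := by
  have hinf : t <:+: cs := (h.isInfix).trans (List.drop_suffix j cs).isInfix
  have h0 : 0 ≤ PySem.Chars.find cs t := (PySem.Chars.find_nonneg_iff cs t).mpr hinf
  obtain ⟨hpre, hmin⟩ := PySem.Chars.find_spec h0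
  have hle : (PySem.Chars.find cs t).toNat ≤ j := by
    by_contra hlt
    push Not at hlt
    exact hmin j hlt h
  have htn := Int.toNat_of_nonneg h0
  exact ⟨h0, hle, by omega⟩

-- the loop's per-position test is exactly "k.toList matches here", for the five tokens
lemma tokAt_iff (cs : List Char) (j : Nat) (k : String) (hk : k ∈ pvToksL) :
    pvTokAt cs k j = true ↔ k.toList <+: cs.drop j := by
  simp only [pvToksL, List.mem_cons, List.not_mem_nil, or_false] at hk
  have hchar : ∀ c : Char, k.toList = [c] → k ≠ "..." →
      (['\n', '!', '?', '#'].contains c) = true →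
      (pvTokAt cs k j = true ↔ k.toList <+: cs.drop j) := by
    intro c hkl hkne hcb
    rw [hkl]
    unfold pvTokAt
    rw [if_neg hkne]
    constructor
    · intro h
      simp only [Bool.and_eq_true, beq_iff_eq] at h
      obtain ⟨hcont, hkeq⟩ := h
      have hgd : cs.getD j ' ' = c := by
        have := congrArg String.toList hkeq
        rw [hkl] at this
        simp at this
        exact this.symm
      have hj : j < cs.length := by
        by_contra hge
        push Not at hge
        rw [List.getD_eq_default _ _ hge] at hgd
        rw [← hgd] at hcb
        exact absurd hcb (by decide)
      rw [List.getD_eq_getElem cs ' ' hj] at hgd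
      exact (singleton_prefix_at cs c j).mpr ⟨hj, hgd⟩
    · intro h
      obtain ⟨hj, hcj⟩ := (singleton_prefix_at cs c j).mp h
      rw [List.getD_eq_getElem cs ' ' hj, hcj]
      simp only [Bool.and_eq_true, beq_iff_eq]
      refine ⟨hcb, ?_⟩
      rw [show String.ofList [c] = String.ofList k.toList from by rw [hkl]]
      simp
  rcases hk with rfl | rfl | rfl | rfl | rfl
  · exact hchar '\n' (by decide) (by decide) (by decide)
  · exact hchar '!' (by decide) (by decide) (by decide)
  · exact hchar '?' (by decide) (by decide) (by decide)
  · exact hchar '#' (by decide) (by decide) (by decide)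
  · unfold pvTokAt
    rw [if_pos rfl, show ("..." : String).toList = ['.', '.', '.'] from by decide]
    exact (dots_prefix_at cs j).symm

-- a token key recorded by the loop is one of the five tokens
lemma tokAt_mem (cs : List Char) (k : String) (j : Nat) (h : pvTokAt cs k j = true) :
    k ∈ pvToksL := by
  unfold pvTokAt at h
  by_cases hke : k = "..."
  · rw [hke]; simp [pvToksL]
  · rw [if_neg hke] at h
    simp only [Bool.and_eq_true, beq_iff_eq] at h
    obtain ⟨hcont, hkeq⟩ := h
    simp only [List.contains_eq_mem, List.mem_cons, List.not_mem_nil, or_false,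
      decide_eq_true_eq] at hcont
    rcases hcont with hc | hc | hc | hc <;> rw [hkeq, hc] <;> simp [pvToksL]

lemma pvFirst_succ (cs : List Char) (maxl : Int) (k : String) (i fuel : Nat) :
    pvFirst cs maxl k i (fuel + 1) =
      if i < cs.length then
        if (i : Int) < maxl then
          if pvTokAt cs k i then some (i : Int) else pvFirst cs maxl k (i + 1) fuel
        else none
      else none := rfl

-- the body of one loop iteration, as a named function (proof-side only)
def pvStep (cs : List Char) (i : Nat) (h : i < cs.length) (d : PySem.Dict String Int) :
    PySem.Dict String Int :=
  let ch := cs[i]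
  let d1 := if (['\n', '!', '?', '#'].contains ch) && !(d.contains (String.ofList [ch])) then
      d.insert (String.ofList [ch]) (i : Int) else d
  let d2 := if !(d1.contains "...") && ((cs.drop i).take 3 == ['.', '.', '.']) then
      d1.insert "..." (i : Int) else d1
  d2

-- one loop step changes the dict exactly by "record k at i if k matches and is not yet recorded"
lemma step_get (cs : List Char) (i : Nat) (hi : i < cs.length)
    (d : PySem.Dict String Int) (k : String) :
    (pvStep cs i hi d).get? k
      = (d.get? k).or (if pvTokAt cs k i then some (i : Int) else none) := by
  unfold pvStep
  have hcontains : ∀ (e : PySem.Dict String Int) (k' : String),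
      e.get? k' = none → e.contains k' = false := by
    intro e k' h
    rw [PySem.Dict.contains_eq_isSome_get?, h]; rfl
  have hcontains' : ∀ (e : PySem.Dict String Int) (k' : String) (v : Int),
      e.get? k' = some v → e.contains k' = true := by
    intro e k' v h
    rw [PySem.Dict.contains_eq_isSome_get?, h]; rfl
  simp only []
  set ch := cs[i] with hch
  by_cases hke : k = "..."
  · -- the dots key is never touched by the char insert
    subst hke
    have hne : ("..." : String) ≠ String.ofList [ch] := by
      intro h
      have := congrArg String.toList h
      simp at this
    have hd1 : (if (['\n', '!', '?', '#'].contains ch) && !(d.contains (String.ofList [ch])) then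
        d.insert (String.ofList [ch]) (i : Int) else d).get? "..." = d.get? "..." := by
      split_ifs with h
      · exact PySem.Dict.get?_insert_of_ne d (i : Int) hne
      · rfl
    have hc1 : (if (['\n', '!', '?', '#'].contains ch) && !(d.contains (String.ofList [ch])) then
        d.insert (String.ofList [ch]) (i : Int) else d).contains "..." = d.contains "..." := by
      split_ifs with h
      · rw [PySem.Dict.contains_insert]
        have : (("..." : String) == String.ofList [ch]) = false := by
          rw [beq_eq_false_iff_ne]; exact hne
        rw [this, Bool.false_or]
      · rfl
    have htok : pvTokAt cs "..." i = ((cs.drop i).take 3 == ['.', '.', '.']) := by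
      unfold pvTokAt; rw [if_pos rfl]
    rw [htok, hc1]
    cases hgd : d.get? "..." with
    | some v =>
      rw [hcontains' d "..." v hgd]
      simp only [Bool.not_true, Bool.false_and, Bool.false_eq_true, if_false]
      rw [hd1, hgd]
      cases ((cs.drop i).take 3 == ['.', '.', '.']) <;> simp
    | none =>
      rw [hcontains d "..." hgd]
      simp only [Bool.not_false, Bool.true_and]
      cases hT : ((cs.drop i).take 3 == ['.', '.', '.']) with
      | true =>
        rw [if_pos rfl, PySem.Dict.get?_insert_self]
        simp
      | false =>
        rw [if_neg (by simp), hd1, hgd]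
        simp
  · -- k is not the dots key: the dots insert never touches it
    have hd2eq : ∀ e : PySem.Dict String Int,
        (if !(e.contains "...") && ((cs.drop i).take 3 == ['.', '.', '.']) then
          e.insert "..." (i : Int) else e).get? k = e.get? k := by
      intro e
      split_ifs with h
      · exact PySem.Dict.get?_insert_of_ne e (i : Int) hke
      · rfl
    rw [hd2eq]
    have htok : pvTokAt cs k i
        = ((['\n', '!', '?', '#'].contains ch) && (k == String.ofList [ch])) := by
      unfold pvTokAt
      rw [if_neg hke, List.getD_eq_getElem cs ' ' hi]
    rw [htok]
    by_cases hkch : k = String.ofList [ch]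
    · -- the char insert's key is k itself
      have hbeq : (k == String.ofList [ch]) = true := by rw [beq_iff_eq]; exact hkch
      rw [hbeq, ← hkch]
      cases hgd : d.get? k with
      | some v =>
        rw [hcontains' d k v hgd]
        simp only [Bool.not_true, Bool.and_false, Bool.false_eq_true, if_false]
        rw [hgd]
        cases (['\n', '!', '?', '#'].contains ch) <;> simp
      | none =>
        rw [hcontains d k hgd]
        simp only [Bool.not_false, Bool.and_true]
        cases hbc : (['\n', '!', '?', '#'].contains ch) with
        | true =>
          rw [if_pos rfl, PySem.Dict.get?_insert_self]
          simp
        | false =>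
          rw [if_neg (by simp), hgd]
          simp
    · -- the char insert's key differs from k
      have hd1 : (if (['\n', '!', '?', '#'].contains ch) && !(d.contains (String.ofList [ch])) then
          d.insert (String.ofList [ch]) (i : Int) else d).get? k = d.get? k := by
        split_ifs with h
        · exact PySem.Dict.get?_insert_of_ne d (i : Int) hkch
        · rfl
      have hbeq : (k == String.ofList [ch]) = false := by
        rw [beq_eq_false_iff_ne]; exact hkch
      rw [hd1, hbeq]
      cases d.get? k <;> simp

-- the loop's dict, read through get?, is "what was there before, else the first match from i on"
lemma loop_get (cs : List Char) (maxl : Int) :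
    ∀ fuel i d k, (pvLoop cs maxl d i fuel).get? k
      = (d.get? k).or (pvFirst cs maxl k i fuel) := by
  intro fuel
  induction fuel with
  | zero =>
    intro i d k
    show d.get? k = (d.get? k).or none
    cases d.get? k <;> rfl
  | succ fuel ih =>
    intro i d k
    rw [pvFirst_succ]
    by_cases hl : i < cs.length
    · by_cases hm : (i : Int) < maxl
      · rw [show pvLoop cs maxl d i (fuel + 1)
            = pvLoop cs maxl (pvStep cs i hl d) (i + 1) fuel from by
          rw [pvLoop, dif_pos hl, if_pos hm]; rfl]
        rw [ih, step_get cs i hl d k, Option.or_assoc, if_pos hl, if_pos hm]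
        congr 1
        cases htok : pvTokAt cs k i <;> simp
      · rw [show pvLoop cs maxl d i (fuel + 1) = d from by rw [pvLoop, dif_pos hl, if_neg hm]]
        rw [if_pos hl, if_neg hm]
        cases d.get? k <;> rfl
    · rw [show pvLoop cs maxl d i (fuel + 1) = d from by rw [pvLoop, dif_neg hl]]
      rw [if_neg hl]
      cases d.get? k <;> rfl

lemma loop_nodup (cs : List Char) (maxl : Int) :
    ∀ fuel i d, d.keys.Nodup → (pvLoop cs maxl d i fuel).keys.Nodup := by
  intro fuel
  induction fuel with
  | zero => intro i d h; exact h
  | succ fuel ih =>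
    intro i d h
    rw [pvLoop]
    by_cases hl : i < cs.length
    · rw [dif_pos hl]
      by_cases hm : (i : Int) < maxl
      · rw [if_pos hm]
        apply ih
        split_ifs <;> try exact h
        all_goals first
          | exact PySem.Dict.nodup_keys_insert _ _ _ h
          | exact PySem.Dict.nodup_keys_insert _ _ _ (PySem.Dict.nodup_keys_insert _ _ _ h)
      · rw [if_neg hm]; exact h
    · rw [dif_neg hl]; exact h

lemma first_some_spec (cs : List Char) (maxl : Int) (k : String) :
    ∀ fuel i v, pvFirst cs maxl k i fuel = some v →
      ∃ m : Nat, v = (m : Int) ∧ i ≤ m ∧ m < cs.length ∧ (m : Int) < maxl ∧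
        pvTokAt cs k m = true ∧ ∀ j, i ≤ j → j < m → pvTokAt cs k j = false := by
  intro fuel
  induction fuel with
  | zero =>
    intro i v h
    exact absurd h (by simp [pvFirst])
  | succ fuel ih =>
    intro i v h
    rw [pvFirst_succ] at h
    by_cases hl : i < cs.length
    · rw [if_pos hl] at h
      by_cases hm : (i : Int) < maxl
      · rw [if_pos hm] at h
        by_cases hC : pvTokAt cs k i = true
        · rw [if_pos hC] at h
          exact ⟨i, (Option.some.inj h).symm, le_rfl, hl, hm, hC,
            fun j hij hjm => by omega⟩
        · rw [if_neg hC] at h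
          obtain ⟨m, hv, h1, h2, h3, h4, h5⟩ := ih (i + 1) v h
          refine ⟨m, hv, by omega, h2, h3, h4, ?_⟩
          intro j hij hjm
          rcases Nat.eq_or_lt_of_le hij with rfl | hlt
          · simpa using hC
          · exact h5 j hlt hjm
      · rw [if_neg hm] at h; exact absurd h (by simp)
    · rw [if_neg hl] at h; exact absurd h (by simp)

lemma first_intro (cs : List Char) (maxl : Int) (k : String) :
    ∀ fuel i m, cs.length - i ≤ fuel → i ≤ m → m < cs.length → (m : Int) < maxl →
      pvTokAt cs k m = true → (∀ j, i ≤ j → j < m → pvTokAt cs k j = false) →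
      pvFirst cs maxl k i fuel = some (m : Int) := by
  intro fuel
  induction fuel with
  | zero => intro i m hfuel him hm _ _ _; omega
  | succ fuel ih =>
    intro i m hfuel him hm hmm htok hmin
    have hl : i < cs.length := by omega
    have hil : (i : Int) < maxl := by
      have : (i : Int) ≤ (m : Int) := by exact_mod_cast him
      omega
    rw [pvFirst_succ, if_pos hl, if_pos hil]
    rcases Nat.eq_or_lt_of_le him with rfl | hlt
    · rw [if_pos htok]
    · rw [if_neg (by rw [hmin i le_rfl hlt]; simp)]
      exact ih (i + 1) m (by omega) (by omega) hm hmm htok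
        (fun j hij hjm => hmin j (by omega) hjm)

-- bridge: the per-key first occurrence is find, when find lands inside the bound
lemma first_eq_find (cs : List Char) (maxl : Int) (k : String) (hk : k ∈ pvToksL) :
    pvFirst cs maxl k 0 cs.length
      = if 0 ≤ PySem.Chars.find cs k.toList ∧ PySem.Chars.find cs k.toList < maxl then
          some (PySem.Chars.find cs k.toList)
        else none := by
  split_ifs with h
  · obtain ⟨h0, hmx⟩ := h
    obtain ⟨hpre, hmin⟩ := PySem.Chars.find_spec h0
    have htn := Int.toNat_of_nonneg h0
    have hflen : (PySem.Chars.find cs k.toList).toNat < cs.length := by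
      have hlen := hpre.length_le
      rw [List.length_drop] at hlen
      have hkne : k.toList ≠ [] := by
        simp only [pvToksL, List.mem_cons, List.not_mem_nil, or_false] at hk
        rcases hk with rfl | rfl | rfl | rfl | rfl <;> decide
      have : 0 < k.toList.length := List.length_pos_iff.mpr hkne
      omega
    have := first_intro cs maxl k cs.length 0 (PySem.Chars.find cs k.toList).toNat
      (by omega) (by omega) hflen (by omega)
      ((tokAt_iff cs _ k hk).mpr hpre)
      (fun j _ hjm => by
        have := hmin j hjm
        cases hT : pvTokAt cs k j
        · rfl
        · exact absurd ((tokAt_iff cs j k hk).mp hT) this)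
    rw [this, htn]
  · cases hF : pvFirst cs maxl k 0 cs.length with
    | none => rfl
    | some v =>
      exfalso
      obtain ⟨m, hv, _, hmlen, hmmx, htok, _⟩ := first_some_spec cs maxl k cs.length 0 v hF
      have hpre := (tokAt_iff cs m k hk).mp htok
      obtain ⟨h0, hle, hleI⟩ := find_le_of_prefix cs k.toList m hpre
      exact h ⟨h0, by omega⟩

-- the five tokens' toLists are exactly the patterns of A's break_points
lemma find_mem_bps (cs : List Char) (k : String) (hk : k ∈ pvToksL) :
    PySem.Chars.find cs k.toList ∈ pvBps cs := by
  simp only [pvToksL, List.mem_cons, List.not_mem_nil, or_false] at hk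
  rcases hk with rfl | rfl | rfl | rfl | rfl
  · rw [show ("\n" : String).toList = ['\n'] from by decide]; simp [pvBps]
  · rw [show ("!" : String).toList = ['!'] from by decide]; simp [pvBps]
  · rw [show ("?" : String).toList = ['?'] from by decide]; simp [pvBps]
  · rw [show ("#" : String).toList = ['#'] from by decide]; simp [pvBps]
  · rw [show ("..." : String).toList = ['.', '.', '.'] from by decide]; simp [pvBps]

lemma bps_mem_find (cs : List Char) (bp : Int) (h : bp ∈ pvBps cs) :
    ∃ k ∈ pvToksL, bp = PySem.Chars.find cs k.toList := by
  simp only [pvBps, List.mem_cons, List.not_mem_nil, or_false] at h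
  rcases h with rfl | rfl | rfl | rfl | rfl
  · exact ⟨"\n", by simp [pvToksL], by rw [show ("\n" : String).toList = ['\n'] from by decide]⟩
  · exact ⟨"!", by simp [pvToksL], by rw [show ("!" : String).toList = ['!'] from by decide]⟩
  · exact ⟨"?", by simp [pvToksL], by rw [show ("?" : String).toList = ['?'] from by decide]⟩
  · exact ⟨"...", by simp [pvToksL], by rw [show ("..." : String).toList = ['.', '.', '.'] from by decide]⟩
  · exact ⟨"#", by simp [pvToksL], by rw [show ("#" : String).toList = ['#'] from by decide]⟩

lemma min?_eq_some_of_min (l : List Int) (m : Int) (hm : m ∈ l)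
    (hmin : ∀ y ∈ l, m ≤ y) : PySem.List.min? l (fun x => x) = some m := by
  cases hmv : PySem.List.min? l (fun x => x) with
  | none =>
    rw [PySem.List.min?_eq_none_iff] at hmv
    rw [hmv] at hm
    exact absurd hm (by simp)
  | some v =>
    have hv := PySem.List.min?_mem hmv
    have hvmin := PySem.List.min?_isMin hmv
    have h1 : v ≤ m := hvmin m hm
    have h2 : m ≤ v := hmin v hv
    rw [le_antisymm h1 h2]

-- membership in the loop dict's filtered values = membership in A's filtered break points
lemma values_mem_iff (cs : List Char) (maxl : Int) (x : Int) :
    x ∈ (pvLoop cs maxl PySem.Dict.empty 0 cs.length).values.filter (fun p => decide (0 < p))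
      ↔ x ∈ (pvBps cs).filter (fun bp => decide (0 < bp) && decide (bp < maxl)) := by
  have hget : ∀ k, (pvLoop cs maxl PySem.Dict.empty 0 cs.length).get? k
      = pvFirst cs maxl k 0 cs.length := by
    intro k
    rw [loop_get, PySem.Dict.get?_empty]
    cases pvFirst cs maxl k 0 cs.length <;> rfl
  have hnodup : (pvLoop cs maxl PySem.Dict.empty 0 cs.length).keys.Nodup :=
    loop_nodup cs maxl cs.length 0 PySem.Dict.empty PySem.Dict.nodup_keys_empty
  constructor
  · intro hx
    obtain ⟨hxv, hxpos⟩ := List.mem_filter.mp hx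
    simp only [decide_eq_true_eq] at hxpos
    simp only [PySem.Dict.values] at hxv
    obtain ⟨p, hpmem, hps⟩ := List.mem_map.mp hxv
    have hget? : (pvLoop cs maxl PySem.Dict.empty 0 cs.length).get? p.1 = some x := by
      have := PySem.Dict.get?_of_mem_items _ (show (p.1, p.2) ∈ _ from by simpa using hpmem) hnodup
      rw [this, hps]
    rw [hget] at hget?
    obtain ⟨m, hv, _, hmlen, hmmx, htok, _⟩ := first_some_spec cs maxl p.1 cs.length 0 x hget?
    have hk := tokAt_mem cs p.1 m htok
    have hfind := first_eq_find cs maxl p.1 hk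
    rw [hget?] at hfind
    by_cases hcond : (0 ≤ PySem.Chars.find cs p.1.toList ∧ PySem.Chars.find cs p.1.toList < maxl)
    · rw [if_pos hcond] at hfind
      obtain ⟨h0, hmx⟩ := hcond
      have hxeq : x = PySem.Chars.find cs p.1.toList := (Option.some.inj hfind)
      refine List.mem_filter.mpr ⟨?_, ?_⟩
      · rw [hxeq]; exact find_mem_bps cs p.1 hk
      · have hxm : x < maxl := by rw [hxeq]; exact hmx
        simp [hxpos, hxm]
    · rw [if_neg hcond] at hfind
      exact absurd hfind (by simp)
  · intro hx
    obtain ⟨hxb, hxcond⟩ := List.mem_filter.mp hx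
    simp only [Bool.and_eq_true, decide_eq_true_eq] at hxcond
    obtain ⟨hxpos, hxmx⟩ := hxcond
    obtain ⟨k, hk, hkeq⟩ := bps_mem_find cs x hxb
    have hfind := first_eq_find cs maxl k hk
    rw [if_pos ⟨by omega, by omega⟩] at hfind
    have hget? : (pvLoop cs maxl PySem.Dict.empty 0 cs.length).get? k = some x := by
      rw [hget, hfind, hkeq]
    have hitems := PySem.Dict.mem_items_of_get?_eq_some _ hget?
    refine List.mem_filter.mpr ⟨?_, by simp [hxpos]⟩
    simp only [PySem.Dict.values]
    exact List.mem_map.mpr ⟨(k, x), hitems, rfl⟩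

-- the minimum of the loop dict's positive values is A's minimum valid break point
lemma key (cs : List Char) (maxl : Int) :
    PySem.List.min? ((pvBps cs).filter (fun bp => decide (0 < bp) && decide (bp < maxl))) (fun x => x)
      = PySem.List.min?
          ((pvLoop cs maxl PySem.Dict.empty 0 cs.length).values.filter (fun p => decide (0 < p)))
          (fun x => x) := by
  cases hA : PySem.List.min? ((pvBps cs).filter (fun bp => decide (0 < bp) && decide (bp < maxl))) (fun x => x) with
  | none =>
    rw [PySem.List.min?_eq_none_iff] at hA
    symm
    rw [PySem.List.min?_eq_none_iff, List.eq_nil_iff_forall_not_mem]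
    intro x hx
    have := (values_mem_iff cs maxl x).mp hx
    rw [hA] at this
    exact absurd this (by simp)
  | some v =>
    have hv := PySem.List.min?_mem hA
    have hvmin := PySem.List.min?_isMin hA
    symm
    apply min?_eq_some_of_min
    · exact (values_mem_iff cs maxl v).mpr hv
    · intro y hy
      exact hvmin y ((values_mem_iff cs maxl y).mp hy)

-- ===== VERDICT (by name: the statement is the Claim_ definition above) =====
theorem extract_hook_spec : Claim_equal_extract_hook := by
  intro caption max_length _
  unfold Spec_extract_hook extract_hook extract_hook_alt
  by_cases hc : caption = ""
  · simp [hc]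
  · simp only [if_neg hc]
    rw [show ([PySem.Chars.find (PySem.Chars.strip caption.toList) ['\n'],
        PySem.Chars.find (PySem.Chars.strip caption.toList) ['!'],
        PySem.Chars.find (PySem.Chars.strip caption.toList) ['?'],
        PySem.Chars.find (PySem.Chars.strip caption.toList) ['.', '.', '.'],
        PySem.Chars.find (PySem.Chars.strip caption.toList) ['#']] : List Int)
        = pvBps (PySem.Chars.strip caption.toList) from rfl]
    rw [key (PySem.Chars.strip caption.toList) max_length]
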